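-- pv_equiv track=rewrite | github.com/jbroll/sheet-cli | src/sheet_cli/grammar.py | _has_unquoted_colon
-- ===== SOURCE A (Python) =====
-- def _has_unquoted_colon(s: str) -> bool:
--     in_quote = False
--     for ch in s:
--         if ch == "'":
--             in_quote = not in_quote
--         elif ch == ':' and not in_quote:
--             return True
--     return False
-- ===== SOURCE B (Python) =====
-- def _has_unquoted_colon(s: str) -> bool:
--     # Split on the quote delimiter: even-indexed pieces are exactly the
--     # substrings outside single-quoted spans.
--     return any(':' in seg for seg in s.split("'")[::2])
-- ===== Notes on version B (the rewrite author's own statement) =====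
-- stated objective: simpler
-- what changed: replaces the per-character scan with an in_quote flag and early return by splitting the string on the quote character and testing only the even-indexed (unquoted) pieces for a colon
import Mathlib
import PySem

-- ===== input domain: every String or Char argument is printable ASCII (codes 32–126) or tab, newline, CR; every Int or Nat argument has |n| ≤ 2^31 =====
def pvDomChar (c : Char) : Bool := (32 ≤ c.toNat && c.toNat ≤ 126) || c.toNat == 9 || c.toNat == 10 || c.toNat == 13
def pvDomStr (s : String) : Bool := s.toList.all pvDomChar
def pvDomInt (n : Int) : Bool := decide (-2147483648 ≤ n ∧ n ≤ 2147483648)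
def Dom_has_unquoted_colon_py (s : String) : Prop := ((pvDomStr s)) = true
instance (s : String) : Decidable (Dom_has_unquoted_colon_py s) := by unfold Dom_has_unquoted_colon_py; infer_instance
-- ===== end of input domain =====

-- B replaces A's stateful character scan by split-on-quote + colon test on the even pieces (simpler decomposition, same cost).

-- ===== PORT A =====
-- the for-loop with early return and the in_quote flag, as structural recursion
def hucGo : List Char → Bool → Bool
  | [], _ => false
  | ch :: rest, inq =>
    if ch = '\'' then hucGo rest (!inq)
    else if ch = ':' ∧ inq = false then true
    else hucGo rest inq

def has_unquoted_colon_py (s : String) : Bool := hucGo s.toList false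

-- ===== PORT B =====
-- return any(':' in seg for seg in s.split("'")[::2])
def has_unquoted_colon_py_alt (s : String) : Bool :=
  match PySem.Str.split? s "'" with
  | none => false          -- unreachable: the separator "'" is nonempty
  | some parts =>
    match PySem.List.slice? parts none none 2 with
    | none => false        -- unreachable: the step 2 is nonzero
    | some evens => evens.any (fun seg => PySem.Str.isIn ":" seg)

-- ===== PRECONDITION & SPEC =====
def Spec_has_unquoted_colon_py (s : String) (out : Bool) : Prop := out = has_unquoted_colon_py_alt s
instance (s : String) (out : Bool) : Decidable (Spec_has_unquoted_colon_py s out) := by unfold Spec_has_unquoted_colon_py; infer_instance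

-- ===== CLAIM (what is proved, stated in full; the proofs are below) =====
def Claim_equal_has_unquoted_colon_py : Prop := ∀ (s : String), Dom_has_unquoted_colon_py s → Spec_has_unquoted_colon_py s (has_unquoted_colon_py s)

-- ===== LEMMAS AND PROOFS =====

-- reference split of a char list on the quote character (proof-side model of s.split("'"))
def mysplit : List Char → List Char → List (List Char)
  | [], cur => [cur.reverse]
  | c :: rest, cur => if c = '\'' then cur.reverse :: mysplit rest [] else mysplit rest (c :: cur)

-- even-indexed elements (proof-side model of xs[::2])
def evens {α : Type} : List α → List α
  | [] => []
  | [x] => [x]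
  | x :: _ :: rest => x :: evens rest

lemma evens_cons {α : Type} (x : α) (xs : List α) : evens (x :: xs) = x :: evens xs.tail := by
  cases xs <;> simp [evens]

-- alternating any-with-parity: altAny ps b = "some piece at an even position (counting from b) has a colon"
def altAny : List (List Char) → Bool → Bool
  | [], _ => false
  | p :: ps, b => (b && p.contains ':') || altAny ps (!b)

lemma splitOn_go_eq (fuel : Nat) (l cur : List Char) (acc : List (List Char))
    (h : l.length < fuel) :
    PySem.Chars.splitOn.go ['\''] fuel l cur acc = acc.reverse ++ mysplit l cur := by
  induction fuel generalizing l cur acc with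
  | zero => omega
  | succ n ih =>
    cases l with
    | nil => simp [PySem.Chars.splitOn.go, mysplit]
    | cons c rest =>
      rw [PySem.Chars.splitOn.go]
      by_cases hc : c = '\''
      · subst hc
        have hp : (['\''].isPrefixOf ('\'' :: rest)) = true := by simp [List.isPrefixOf]
        rw [if_pos hp]
        have hd : List.drop (['\''] : List Char).length ('\'' :: rest) = rest := by simp
        rw [hd, ih rest [] (cur.reverse :: acc) (by simpa using Nat.lt_of_succ_lt_succ h)]
        simp [mysplit]
      · have hp : (['\''].isPrefixOf (c :: rest)) = false := by
          simp [List.isPrefixOf]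
          exact fun hh => (hc hh.symm).elim
        rw [hp]
        simp only [Bool.false_eq_true, if_false]
        rw [ih rest (c :: cur) acc (by simpa using Nat.lt_of_succ_lt_succ h)]
        simp [mysplit, hc]

lemma splitOn_quote (cs : List Char) :
    PySem.Chars.splitOn cs ['\''] = mysplit cs [] := by
  unfold PySem.Chars.splitOn
  rw [splitOn_go_eq cs.length.succ cs [] [] (Nat.lt_succ_self _)]
  simp

lemma filterMap_two_mul {α : Type} (xs : List α) (n : Nat) (h : (xs.length + 1) / 2 ≤ n) :
    (List.range n).filterMap (fun k => xs[2 * k]?) = evens xs := by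
  induction xs using evens.induct generalizing n with
  | case1 => simp [evens]
  | case2 x =>
    cases n with
    | zero => simp at h
    | succ m =>
      rw [List.range_succ_eq_map]
      simp [evens, List.filterMap_map]
  | case3 x y rest ih =>
    cases n with
    | zero => simp at h
    | succ m =>
      rw [List.range_succ_eq_map]
      simp only [List.filterMap_cons, List.filterMap_map]
      have hx : (x :: y :: rest)[2 * 0]? = some x := by simp
      rw [hx]
      have hstep : (fun k => (x :: y :: rest)[2 * (k + 1)]?) = (fun k => rest[2 * k]?) := by
        funext k
        have h2 : 2 * (k + 1) = 2 * k + 1 + 1 := by ring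
        rw [h2]
        simp
      simp only [Function.comp_def]
      rw [show (fun k => (x :: y :: rest)[2 * (k + 1)]?) = (fun k => rest[2 * k]?) from hstep]
      rw [ih m (by simp at h ⊢; omega)]
      simp [evens]

lemma slice?_step_two {α : Type} (xs : List α) :
    PySem.List.slice? xs none none 2 = some (evens xs) := by
  unfold PySem.List.slice? PySem.List.sliceIndices
  norm_num
  have hf : (fun (x : Nat) => xs[(2 * (x : Int)).toNat]?) = (fun k => xs[2 * k]?) := by
    funext k
    rw [show ((2 * (k : Int)).toNat) = 2 * k by omega]
  rw [hf]
  apply filterMap_two_mul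
  split_ifs with h <;> omega

lemma contains_eq_isIn (p : List Char) : PySem.Chars.isIn [':'] p = p.contains ':' := by
  rcases h : p.contains ':' with _ | _
  · have : ¬ [':'] <:+: p := by
      intro hinf
      have : ':' ∈ p := hinf.mem (by simp)
      simp [List.contains_eq_mem] at h
      exact h this
    simpa [PySem.Chars.isIn_eq_false_iff] using this
  · have : ':' ∈ p := by simpa [List.contains_eq_mem] using h
    have : [':'] <:+: p := by
      rcases List.mem_iff_append.mp this with ⟨pre, suf, rfl⟩
      exact ⟨pre, suf, by simp⟩
    rw [← PySem.Chars.isIn_iff_infix] at this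
    exact this

lemma altAny_evens (ps : List (List Char)) :
    altAny ps true = (evens ps).any (fun p => p.contains ':') ∧
    altAny ps false = (evens ps.tail).any (fun p => p.contains ':') := by
  induction ps with
  | nil => simp [altAny, evens]
  | cons p rest ih =>
    constructor
    · simp only [altAny, Bool.not_true, ih.2, evens_cons]
      simp
    · simp only [altAny, Bool.not_false, ih.1]
      simp

lemma contains_cons_ne (c : Char) (cur : List Char) (h : ¬ c = ':') :
    ((c :: cur).contains ':') = cur.contains ':' := by
  simp only [List.contains_eq_mem, List.mem_cons, decide_eq_decide]
  constructor
  · rintro (h1 | h1)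
    · exact (h h1.symm).elim
    · exact h1
  · exact Or.inr

lemma main_invariant (cs : List Char) (cur : List Char) (inq : Bool) :
    altAny (mysplit cs cur) (!inq) = ((!inq && cur.contains ':') || hucGo cs inq) := by
  induction cs generalizing cur inq with
  | nil =>
    simp [mysplit, altAny, hucGo]
  | cons c rest ih =>
    by_cases hc : c = '\''
    · subst hc
      have hs : mysplit ('\'' :: rest) cur = cur.reverse :: mysplit rest [] := by
        simp [mysplit]
      have hg : hucGo ('\'' :: rest) inq = hucGo rest (!inq) := by
        simp [hucGo]
      rw [hs, hg]
      simp only [altAny, List.contains_reverse]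
      cases inq
      · have h1 := ih [] true
        simp only [Bool.not_true] at h1
        rw [show (!(!false)) = false by rfl, h1]
        simp
      · have h1 := ih [] false
        simp only [Bool.not_false] at h1
        rw [show (!(!true)) = true by rfl, h1]
        simp
    · have hs : mysplit (c :: rest) cur = mysplit rest (c :: cur) := by
        simp [mysplit, hc]
      rw [hs, ih (c :: cur) inq]
      by_cases hcolon : c = ':'
      · subst hcolon
        have hg : hucGo (':' :: rest) inq =
            (if inq = false then true else hucGo rest inq) := by
          simp [hucGo, hc]
        rw [hg]
        cases inq <;> simp [List.contains_eq_mem]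
      · rw [contains_cons_ne c cur hcolon]
        have hg : hucGo (c :: rest) inq = hucGo rest inq := by
          simp [hucGo, hc, hcolon]
        rw [hg]

lemma evens_map {α β : Type} (f : α → β) (l : List α) :
    evens (l.map f) = (evens l).map f := by
  induction l using evens.induct with
  | case1 => simp [evens]
  | case2 x => simp [evens]
  | case3 x y rest ih => simp [evens, ih]

-- ===== VERDICT (by name: the statement is the Claim_ definition above) =====
theorem has_unquoted_colon_py_spec : Claim_equal_has_unquoted_colon_py := by
  intro s _
  unfold Spec_has_unquoted_colon_py has_unquoted_colon_py has_unquoted_colon_py_alt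
  have hsplit : PySem.Str.split? s "'" =
      some ((mysplit s.toList []).map String.ofList) := by
    unfold PySem.Str.split? PySem.Chars.split?
    rw [if_neg (by simp : ¬ ("'".toList.isEmpty = true))]
    have : "'".toList = ['\''] := rfl
    rw [this, splitOn_quote]
    rfl
  rw [hsplit]
  simp only []
  rw [slice?_step_two]
  simp only []
  rw [evens_map]
  have hany : ((evens (mysplit s.toList [])).map String.ofList).any
      (fun seg => PySem.Str.isIn ":" seg) =
      (evens (mysplit s.toList [])).any (fun p => p.contains ':') := by
    rw [List.any_map]
    congr 1
    funext p
    simp only [Function.comp_def]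
    rw [PySem.Str.isIn_eq, show (":".toList) = [':'] from rfl,
      String.toList_ofList, contains_eq_isIn]
  rw [hany]
  rw [← (altAny_evens (mysplit s.toList [])).1]
  have := main_invariant s.toList [] false
  simpa using this.symm
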